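-- pv_equiv track=rewrite | github.com/JacktheFowler/learn-DataStruct | leetcode/每日一题/1935可以输入的最大单词数.py | solve
-- ===== SOURCE A (Python) =====
-- def solve(text, brokenLetters):
--     words=text.split()
--     brokenLettersSet=set(brokenLetters)
--     cnt=0
--     for i in words:
--         if i=='':
--             continue
--         wordSet=set(i)
--         if not (wordSet&brokenLettersSet): # 如果交集为空
--             cnt+=1
--     return cnt
-- ===== SOURCE B (Python) =====
-- def solve(text, brokenLetters):
--     broken = set(brokenLetters)
--     cnt = 0
--     in_word = False
--     clean = True
--     for ch in text:
--         if ch.isspace():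
--             if in_word:
--                 if clean:
--                     cnt += 1
--                 in_word = False
--         else:
--             if not in_word:
--                 in_word = True
--                 clean = True
--             clean = clean and (ch not in broken)
--     if in_word and clean:
--         cnt += 1
--     return cnt
-- ===== Notes on version B (the rewrite author's own statement) =====
-- stated objective: alternative
-- what changed: Replaces text.split() plus a per-word set intersection with a single character scan carrying (count, in_word, clean) state, closing words at whitespace boundaries; no word list or per-word sets are built.
import Mathlib
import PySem

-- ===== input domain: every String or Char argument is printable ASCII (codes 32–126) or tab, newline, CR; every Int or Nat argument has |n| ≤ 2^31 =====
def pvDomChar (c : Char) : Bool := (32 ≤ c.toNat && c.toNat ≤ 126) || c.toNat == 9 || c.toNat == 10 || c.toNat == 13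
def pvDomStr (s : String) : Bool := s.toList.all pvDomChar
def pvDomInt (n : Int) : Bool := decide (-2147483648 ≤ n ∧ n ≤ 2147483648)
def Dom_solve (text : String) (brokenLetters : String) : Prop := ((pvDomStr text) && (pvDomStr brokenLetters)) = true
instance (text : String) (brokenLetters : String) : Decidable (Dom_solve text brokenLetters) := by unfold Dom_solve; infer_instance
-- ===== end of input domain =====

-- B replaces text.split() + per-word set intersections by a single character scan with
-- (count, in_word, clean) state; alternative decomposition, same asymptotic cost.

-- ===== PORT A =====
def solve (text : String) (brokenLetters : String) : Int :=
  let words := PySem.Str.split₀ text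
  let brokenLettersSet : PySem.Set Char := PySem.Set.ofList brokenLetters.toList
  words.foldl (fun cnt i =>
    if i = "" then cnt
    else
      let wordSet : PySem.Set Char := PySem.Set.ofList i.toList
      if PySem.Set.inter wordSet brokenLettersSet = [] then cnt + 1 else cnt) 0

-- ===== PORT B =====
def solve_alt (text : String) (brokenLetters : String) : Int :=
  let broken : PySem.Set Char := PySem.Set.ofList brokenLetters.toList
  let st := text.toList.foldl (fun st ch =>
    let (cnt, in_word, clean) := st
    if PySem.Chars.isspace ch then
      if in_word then ((if clean then cnt + 1 else cnt), false, clean)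
      else (cnt, in_word, clean)
    else
      let clean' := if in_word then clean else true
      (cnt, true, clean' && !(PySem.Set.contains broken ch))) ((0 : Int), false, true)
  if st.2.1 && st.2.2 then st.1 + 1 else st.1

-- ===== PRECONDITION & SPEC =====
def Spec_solve (text : String) (brokenLetters : String) (out : Int) : Prop := out = solve_alt text brokenLetters
instance (text : String) (brokenLetters : String) (out : Int) : Decidable (Spec_solve text brokenLetters out) := by unfold Spec_solve; infer_instance

-- ===== CLAIM (what is proved, stated in full; the proofs are below) =====
def Claim_equal_solve : Prop := ∀ (text : String) (brokenLetters : String), Dom_solve text brokenLetters → Spec_solve text brokenLetters (solve text brokenLetters)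

-- ===== LEMMAS AND PROOFS =====

-- a word is "clean": none of its characters is broken
def goodW (bb : List Char) (w : List Char) : Bool := w.all (fun c => !(PySem.Set.contains bb c))

-- number of nonempty clean words
def cGood (bb : List Char) (ws : List (List Char)) : Int :=
  ((ws.filter (fun w => !w.isEmpty && goodW bb w)).length : Int)

theorem cGood_nil (bb : List Char) : cGood bb [] = 0 := rfl

theorem cGood_cons (bb : List Char) (w : List Char) (ws : List (List Char)) :
    cGood bb (w :: ws) = (if !w.isEmpty && goodW bb w then 1 else 0) + cGood bb ws := by
  simp only [cGood, List.filter_cons]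
  split <;> simp <;> omega

theorem cGood_append (bb : List Char) (ws₁ ws₂ : List (List Char)) :
    cGood bb (ws₁ ++ ws₂) = cGood bb ws₁ + cGood bb ws₂ := by
  simp [cGood, List.filter_append]

theorem goodW_reverse (bb : List Char) (w : List Char) :
    goodW bb w.reverse = goodW bb w := by
  simp [goodW, List.all_eq]

-- one-step unfoldings of split₀.go
theorem go_nil (cur : List Char) (acc : List (List Char)) :
    PySem.Chars.split₀.go [] cur acc
      = if cur.isEmpty then acc.reverse else (cur.reverse :: acc).reverse := by
  by_cases h : cur.isEmpty <;> simp [PySem.Chars.split₀.go, h]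

theorem go_cons (c : Char) (rest cur : List Char) (acc : List (List Char)) :
    PySem.Chars.split₀.go (c :: rest) cur acc
      = if PySem.Chars.isspace c then
          (if cur.isEmpty then PySem.Chars.split₀.go rest [] acc
           else PySem.Chars.split₀.go rest [] (cur.reverse :: acc))
        else PySem.Chars.split₀.go rest (c :: cur) acc := by
  by_cases hs : PySem.Chars.isspace c <;> by_cases hc : cur.isEmpty <;>
    simp [PySem.Chars.split₀.go, hs, hc]

-- the intersection test of A is the all-clean test
theorem inter_nil_iff (bb : List Char) (w : List Char) :
    (PySem.Set.inter (PySem.Set.ofList w) (PySem.Set.ofList bb) = []) ↔ goodW bb w = true := by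
  simp only [PySem.Set.inter, List.filter_eq_nil_iff, goodW, List.all_eq_true]
  constructor
  · intro h c hc
    have := h c ((PySem.Set.mem_ofList w c).2 hc)
    simp only [PySem.Set.contains, List.contains_eq_mem] at this ⊢
    simp only [PySem.Set.mem_ofList] at this ⊢
    simpa using this
  · intro h c hc
    have hc' := (PySem.Set.mem_ofList w c).1 hc
    have := h c hc'
    simp only [PySem.Set.contains, List.contains_eq_mem] at this ⊢
    simp only [PySem.Set.mem_ofList]
    simpa using this

theorem ofList_eq_empty_iff (w : List Char) : (String.ofList w = "") ↔ w = [] := by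
  constructor
  · intro h; have := congrArg String.toList h; simpa using this
  · rintro rfl; rfl

-- A's fold counts the nonempty clean words
theorem a_fold (bb : List Char) (ws : List (List Char)) (cnt : Int) :
    (List.map String.ofList ws).foldl (fun cnt i =>
      if i = "" then cnt
      else if PySem.Set.inter (PySem.Set.ofList i.toList) (PySem.Set.ofList bb) = [] then cnt + 1
      else cnt) cnt
      = cnt + cGood bb ws := by
  induction ws generalizing cnt with
  | nil => simp [cGood_nil]
  | cons w ws ih =>
    simp only [List.map_cons, List.foldl_cons, cGood_cons]
    rw [ih]
    by_cases hw : w = []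
    · subst hw; simp
    · have h1 : ¬ (String.ofList w = "") := fun h => hw ((ofList_eq_empty_iff w).1 h)
      simp only [if_neg h1, String.toList_ofList]
      by_cases hg : goodW bb w = true
      · rw [if_pos ((inter_nil_iff bb w).2 hg)]
        simp [hw, hg]; omega
      · have hg' : goodW bb w = false := by
          cases h : goodW bb w
          · rfl
          · exact absurd h hg
        rw [if_neg (fun h => hg ((inter_nil_iff bb w).1 h))]
        simp [hw, hg']

-- shift the accumulator of split₀.go out front
theorem go_acc (s : List Char) : ∀ (cur : List Char) (acc : List (List Char)),
    PySem.Chars.split₀.go s cur acc = acc.reverse ++ PySem.Chars.split₀.go s cur [] := by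
  induction s with
  | nil =>
    intro cur acc
    by_cases h : cur.isEmpty <;> simp [go_nil, h]
  | cons c rest ih =>
    intro cur acc
    by_cases hs : PySem.Chars.isspace c
    · by_cases hc : cur.isEmpty
      · simp only [go_cons, hs, hc, if_true]
        exact ih [] acc
      · simp only [go_cons, hs, hc, if_true, Bool.false_eq_true, ite_false]
        rw [ih [] (cur.reverse :: acc), ih [] [cur.reverse]]
        simp
    · simp only [go_cons, hs, Bool.false_eq_true, ite_false]
      exact ih (c :: cur) acc

-- goodW / cGood only look at membership, so set(brokenLetters) and the raw list agree
theorem contains_ofList (bb : List Char) (c : Char) :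
    PySem.Set.contains (PySem.Set.ofList bb) c = PySem.Set.contains bb c := by
  simp [PySem.Set.contains, List.contains_eq_mem, PySem.Set.mem_ofList]

theorem goodW_ofList (bb : List Char) (w : List Char) :
    goodW (PySem.Set.ofList bb) w = goodW bb w := by
  simp [goodW, contains_ofList]

theorem cGood_ofList (bb : List Char) (ws : List (List Char)) :
    cGood (PySem.Set.ofList bb) ws = cGood bb ws := by
  simp [cGood, goodW_ofList]

-- B's step function (the body of solve_alt's fold)
def bStep (bb : PySem.Set Char) (st : Int × Bool × Bool) (ch : Char) : Int × Bool × Bool :=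
  let (cnt, in_word, clean) := st
  if PySem.Chars.isspace ch then
    if in_word then ((if clean then cnt + 1 else cnt), false, clean)
    else (cnt, in_word, clean)
  else
    let clean' := if in_word then clean else true
    (cnt, true, clean' && !(PySem.Set.contains bb ch))

def bFin (st : Int × Bool × Bool) : Int := if st.2.1 && st.2.2 then st.1 + 1 else st.1

-- main invariant: B's scan from a partially-read word equals the words-based count
theorem b_main (bb : List Char) (s : List Char) :
    ∀ (cur : List Char) (cnt : Int) (cl : Bool),
    (cur = [] ∨ cl = goodW bb cur) →
    bFin (s.foldl (bStep bb) (cnt, !cur.isEmpty, cl))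
      = cnt + cGood bb (PySem.Chars.split₀.go s cur []) := by
  induction s with
  | nil =>
    intro cur cnt cl hcl
    simp only [List.foldl_nil, go_nil, bFin, List.reverse_nil, List.reverse_cons, List.nil_append]
    by_cases hc : cur.isEmpty
    · simp [hc, cGood_nil]
    · have hcur : ¬ cur = [] := by simpa [List.isEmpty_iff] using hc
      have hcl' : cl = goodW bb cur := hcl.resolve_left hcur
      have hne : cur.reverse.isEmpty = false := by
        simp [List.isEmpty_iff, hcur]
      simp only [hc, Bool.false_eq_true, ite_false, cGood_cons, cGood_nil, goodW_reverse, hne,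
        Bool.not_false, Bool.true_and, hcl']
      by_cases hg : goodW bb cur = true
      · simp [hg]
      · have hg' : goodW bb cur = false := by
          cases h : goodW bb cur
          · rfl
          · exact absurd h hg
        simp [hg']
  | cons c rest ih =>
    intro cur cnt cl hcl
    simp only [List.foldl_cons]
    by_cases hs : PySem.Chars.isspace c
    · by_cases hc : cur.isEmpty
      · have hcur : cur = [] := by simpa [List.isEmpty_iff] using hc
        subst hcur
        have hst : bStep bb (cnt, !([] : List Char).isEmpty, cl) c = (cnt, !([] : List Char).isEmpty, cl) := by
          simp [bStep, hs]
        rw [hst, go_cons]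
        simp only [hs, if_true, List.isEmpty_nil, if_true]
        exact ih [] cnt cl (Or.inl rfl)
      · have hcur : ¬ cur = [] := by simpa [List.isEmpty_iff] using hc
        have hcl' : cl = goodW bb cur := hcl.resolve_left hcur
        have hcf : cur.isEmpty = false := by simp [List.isEmpty_iff, hcur]
        have hst : bStep bb (cnt, !cur.isEmpty, cl) c
            = ((if cl then cnt + 1 else cnt), false, cl) := by
          simp [bStep, hs, hcf]
        rw [hst, go_cons]
        simp only [hs, if_true, hcf, Bool.false_eq_true, ite_false]
        rw [go_acc rest [] [cur.reverse]]
        simp only [List.reverse_cons, List.reverse_nil, List.nil_append]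
        rw [cGood_append, cGood_cons, cGood_nil, goodW_reverse]
        have h2 := ih [] (if cl then cnt + 1 else cnt) cl (Or.inl rfl)
        simp only [List.isEmpty_nil, Bool.not_true] at h2
        rw [h2]
        have hne : cur.reverse.isEmpty = false := by simp [List.isEmpty_iff, hcur]
        rw [← hcl']
        cases cl <;> simp [hne] <;> omega
    · -- non-space: extend the current word
      have hst : bStep bb (cnt, !cur.isEmpty, cl) c
          = (cnt, true, (if !cur.isEmpty then cl else true) && !(PySem.Set.contains bb c)) := by
        simp [bStep, hs]
      have hnew : ((if !cur.isEmpty then cl else true) && !(PySem.Set.contains bb c))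
          = goodW bb (c :: cur) := by
        by_cases hc0 : cur = []
        · subst hc0; simp [goodW]
        · have h : cl = goodW bb cur := hcl.resolve_left hc0
          have hcf : cur.isEmpty = false := by simp [hc0]
          rw [h]
          simp only [hcf, Bool.not_false, if_true, goodW, List.all_cons]
          exact Bool.and_comm _ _
      rw [hst, hnew, go_cons]
      simp only [hs, Bool.false_eq_true, ite_false]
      have h2 := ih (c :: cur) cnt (goodW bb (c :: cur)) (Or.inr rfl)
      simpa using h2

-- ===== VERDICT (by name: the statement is the Claim_ definition above) =====
theorem solve_spec : Claim_equal_solve := by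
  intro text brokenLetters _
  show solve text brokenLetters = solve_alt text brokenLetters
  have h1 : solve text brokenLetters
      = 0 + cGood brokenLetters.toList (PySem.Chars.split₀.go text.toList [] []) :=
    a_fold brokenLetters.toList (PySem.Chars.split₀ text.toList) 0
  have h2 := b_main (PySem.Set.ofList brokenLetters.toList) text.toList [] 0 true (Or.inl rfl)
  have h3 : solve_alt text brokenLetters
      = bFin (text.toList.foldl (bStep (PySem.Set.ofList brokenLetters.toList))
              (0, !([] : List Char).isEmpty, true)) := rfl
  rw [h1, h3, h2, cGood_ofList]
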